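-- pv_equiv track=rewrite | github.com/CRingrose94/ProjectEuler | Euler 071.py | compute
-- ===== SOURCE A (Python) =====
-- def compute(limit):
--
--     n_max, d_max = 0, 1
--
--     for d in range(2, limit + 1):
--         n = d * 3 // 7
--         if d % 7 == 0:
--             n -= 1
--         if n * d_max > d * n_max:
--             n_max = n
--             d_max = d
--     return n_max
-- ===== SOURCE B (Python) =====
-- def compute(limit):
--     # Farey left neighbor of 3/7: 3q - 7p = 1, smallest q is 5 (p=2), then q = 5+7k.
--     if limit < 3:
--         return 0
--     if limit < 5:
--         return 1
--     return 2 + 3 * ((limit - 5) // 7)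
-- ===== Notes on version B (the rewrite author's own statement) =====
-- stated objective: faster
-- what changed: Replaced the linear scan over all denominators by the closed-form Farey left-neighbour of three-sevenths, computed with a single floor division.
import Mathlib
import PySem

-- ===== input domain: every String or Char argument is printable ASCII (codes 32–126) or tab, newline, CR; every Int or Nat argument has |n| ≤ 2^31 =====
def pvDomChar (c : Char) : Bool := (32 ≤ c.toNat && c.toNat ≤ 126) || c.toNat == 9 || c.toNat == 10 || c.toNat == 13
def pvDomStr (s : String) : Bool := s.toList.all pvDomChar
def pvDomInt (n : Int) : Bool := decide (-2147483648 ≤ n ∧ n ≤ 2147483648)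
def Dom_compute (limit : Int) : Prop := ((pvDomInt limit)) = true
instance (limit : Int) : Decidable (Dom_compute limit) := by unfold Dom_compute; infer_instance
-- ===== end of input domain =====

-- B replaces A's O(limit) scan by the closed-form Farey left neighbor of 3/7 (O(1)).

-- ===== PORT A =====
def compute (limit : Int) : Int :=
  (((PySem.List.pyRange 2 (limit + 1) 1).foldl
    (fun (st : Int × Int) (d : Int) =>
      let n0 := PySem.Int.floordiv (d * 3) 7
      let n := if PySem.Int.mod d 7 = 0 then n0 - 1 else n0
      if n * st.2 > d * st.1 then (n, d) else st)
    (0, 1))).1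

-- ===== PORT B =====
def compute_alt (limit : Int) : Int :=
  if limit < 3 then 0
  else if limit < 5 then 1
  else 2 + 3 * PySem.Int.floordiv (limit - 5) 7

-- ===== PRECONDITION & SPEC =====
def Spec_compute (limit : Int) (out : Int) : Prop := out = compute_alt limit
instance (limit : Int) (out : Int) : Decidable (Spec_compute limit out) := by unfold Spec_compute; infer_instance

-- ===== CLAIM (what is proved, stated in full; the proofs are below) =====
def Claim_equal_compute : Prop := ∀ (limit : Int), Dom_compute limit → Spec_compute limit (compute limit)

-- ===== LEMMAS AND PROOFS =====

-- A's loop body, named for the proofs (definitionally the lambda in `compute`).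
def stepA (st : Int × Int) (d : Int) : Int × Int :=
  let n0 := PySem.Int.floordiv (d * 3) 7
  let n := if PySem.Int.mod d 7 = 0 then n0 - 1 else n0
  if n * st.2 > d * st.1 then (n, d) else st

-- The loop state after processing denominators 2..m.
def bestPair (m : Int) : Int × Int :=
  if m < 3 then (0, 1)
  else if m < 5 then (1, 3)
  else (2 + 3 * ((m - 5) / 7), 5 + 7 * ((m - 5) / 7))

lemma compute_eq_stepA (limit : Int) :
    compute limit = ((PySem.List.pyRange 2 (limit + 1) 1).foldl stepA (0, 1)).1 := rfl

lemma stepA_best (d : Int) (hd : 6 ≤ d) : stepA (bestPair (d - 1)) d = bestPair d := by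
  have h7 : (0 : Int) < 7 := by norm_num
  unfold stepA bestPair
  rw [PySem.Int.floordiv_eq_ediv_of_pos h7, PySem.Int.mod_eq_emod_of_pos h7]
  obtain ⟨k, r, hdr, hr0, hr7⟩ : ∃ k r : Int, d = 7 * k + r + 6 ∧ 0 ≤ r ∧ r < 7 :=
    ⟨(d - 6) / 7, (d - 6) % 7, by omega, by omega, by omega⟩
  subst hdr
  have hprev : ¬ (7 * k + r + 6 - 1 < 3) ∧ ¬ (7 * k + r + 6 - 1 < 5) := by omega
  have hcur : ¬ (7 * k + r + 6 < 3) ∧ ¬ (7 * k + r + 6 < 5) := by omega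
  simp only [hprev.1, hprev.2, hcur.1, hcur.2, if_false]
  have hkprev : (7 * k + r + 6 - 1 - 5) / 7 = k := by omega
  interval_cases r
  · -- r = 0 : d ≡ 6 (mod 7), no update
    have hn : (7 * k + 0 + 6) * 3 / 7 = 3 * k + 2 := by omega
    have hm : ¬ ((7 * k + 0 + 6) % 7 = 0) := by omega
    have hk : (7 * k + 0 + 6 - 5) / 7 = k := by omega
    simp only [hn, hm, if_false, hkprev, hk]
    rw [if_neg (by nlinarith)]
  · -- r = 1 : d ≡ 0 (mod 7), n decremented, no update
    have hn : (7 * k + 1 + 6) * 3 / 7 = 3 * k + 3 := by omega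
    have hm : (7 * k + 1 + 6) % 7 = 0 := by omega
    have hk : (7 * k + 1 + 6 - 5) / 7 = k := by omega
    simp only [hn, hm, if_true, hkprev, hk]
    rw [if_neg (by nlinarith)]
  · have hn : (7 * k + 2 + 6) * 3 / 7 = 3 * k + 3 := by omega
    have hm : ¬ ((7 * k + 2 + 6) % 7 = 0) := by omega
    have hk : (7 * k + 2 + 6 - 5) / 7 = k := by omega
    simp only [hn, hm, if_false, hkprev, hk]
    rw [if_neg (by nlinarith)]
  · have hn : (7 * k + 3 + 6) * 3 / 7 = 3 * k + 3 := by omega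
    have hm : ¬ ((7 * k + 3 + 6) % 7 = 0) := by omega
    have hk : (7 * k + 3 + 6 - 5) / 7 = k := by omega
    simp only [hn, hm, if_false, hkprev, hk]
    rw [if_neg (by nlinarith)]
  · have hn : (7 * k + 4 + 6) * 3 / 7 = 3 * k + 4 := by omega
    have hm : ¬ ((7 * k + 4 + 6) % 7 = 0) := by omega
    have hk : (7 * k + 4 + 6 - 5) / 7 = k := by omega
    simp only [hn, hm, if_false, hkprev, hk]
    rw [if_neg (by nlinarith)]
  · have hn : (7 * k + 5 + 6) * 3 / 7 = 3 * k + 4 := by omega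
    have hm : ¬ ((7 * k + 5 + 6) % 7 = 0) := by omega
    have hk : (7 * k + 5 + 6 - 5) / 7 = k := by omega
    simp only [hn, hm, if_false, hkprev, hk]
    rw [if_neg (by nlinarith)]
  · -- r = 6 : d ≡ 5 (mod 7), the Farey neighbor improves, update
    have hn : (7 * k + 6 + 6) * 3 / 7 = 3 * k + 5 := by omega
    have hm : ¬ ((7 * k + 6 + 6) % 7 = 0) := by omega
    have hk : (7 * k + 6 + 6 - 5) / 7 = k + 1 := by omega
    simp only [hn, hm, if_false, hkprev, hk]
    rw [if_pos (by nlinarith)]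
    simp only [Prod.mk.injEq]; constructor <;> ring

lemma foldl_best (m : Int) (h2 : 2 ≤ m) :
    (PySem.List.pyRange 2 (m + 1) 1).foldl stepA (0, 1) = bestPair m := by
  induction m, h2 using Int.le_induction with
  | base =>
    rw [PySem.List.pyRange_one_singleton]
    decide
  | succ m hm ih =>
    rw [show m + 1 + 1 = (m + 1) + 1 by ring,
        PySem.List.pyRange_one_succ_right (by omega : (2 : Int) ≤ m + 1),
        List.foldl_append, ih]
    simp only [List.foldl_cons, List.foldl_nil]
    by_cases h6 : 6 ≤ m + 1
    · have := stepA_best (m + 1) h6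
      rwa [show m + 1 - 1 = m by ring] at this
    · have hub : m ≤ 4 := by omega
      interval_cases m <;> decide

-- ===== VERDICT (by name: the statement is the Claim_ definition above) =====
theorem compute_spec : Claim_equal_compute := by
  intro limit _
  unfold Spec_compute compute_alt
  rw [compute_eq_stepA]
  by_cases h2 : 2 ≤ limit
  · rw [foldl_best limit h2]
    unfold bestPair
    rw [PySem.Int.floordiv_eq_ediv_of_pos (by norm_num : (0:Int) < 7)]
    split_ifs <;> simp
  · rw [PySem.List.pyRange_one_eq_nil (by omega)]
    rw [if_pos (by omega)]
    rfl
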